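-- pv_equiv track=rewrite | github.com/ErwanGit/AdventofCode2024 | Day1/functions.py | occur_numbers
-- ===== SOURCE A (Python) =====
-- def occur_numbers(list):
--     dict_occur_numbers = dict()
--     for number in list:
--         if number in dict_occur_numbers:
--             dict_occur_numbers[number] += 1
--         else:
--             dict_occur_numbers[number] = 1
--     return dict_occur_numbers
-- ===== SOURCE B (Python) =====
-- def occur_numbers(list):
--     # Sort a copy, count adjacent runs, then present counts in first-occurrence order.
--     counts = {}
--     current = None
--     run = 0
--     for x in sorted(list):
--         if run > 0 and x == current:
--             run += 1
--         else:
--             if run > 0: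
--                 counts[current] = run
--             current = x
--             run = 1
--     if run > 0:
--         counts[current] = run
--     return {x: counts[x] for x in dict.fromkeys(list)}
-- ===== Notes on version B (the rewrite author's own statement) =====
-- stated objective: alternative
-- what changed: Instead of a single pass that grows a counter dict with a membership test per element, B sorts a copy of the list, counts adjacent runs of equal values with a run-length loop, and then emits the counts keyed in first-occurrence order via dict.fromkeys.
import Mathlib
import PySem

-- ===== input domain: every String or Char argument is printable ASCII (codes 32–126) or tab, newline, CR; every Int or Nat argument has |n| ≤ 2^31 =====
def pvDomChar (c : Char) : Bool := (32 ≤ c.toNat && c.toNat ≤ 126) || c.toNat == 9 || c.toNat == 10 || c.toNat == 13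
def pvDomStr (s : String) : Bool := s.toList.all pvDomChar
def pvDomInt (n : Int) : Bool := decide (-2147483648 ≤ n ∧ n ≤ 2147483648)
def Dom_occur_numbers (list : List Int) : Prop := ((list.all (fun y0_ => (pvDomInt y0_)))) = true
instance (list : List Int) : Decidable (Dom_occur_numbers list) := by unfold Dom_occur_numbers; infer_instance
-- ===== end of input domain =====

-- B replaces A's single-pass counter dict by sorting a copy, run-length counting adjacent equal values, and presenting the counts in first-occurrence order (same return value; no side effects; not faster).


-- ===== PORT A =====
-- for number in list: if number in d: d[number] += 1 else: d[number] = 1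
def occur_numbers (list : List Int) : List (Int × Int) :=
  (list.foldl
    (fun d number =>
      if d.contains number then d.modify number 0 (· + 1) else d.insert number 1)
    (PySem.Dict.empty : PySem.Dict Int Int)).items

-- ===== PORT B =====
-- one loop iteration of 'for x in sorted(list)': state is (counts, current, run)
def occurRunStep (st : PySem.Dict Int Int × Option Int × Int) (x : Int) :
    PySem.Dict Int Int × Option Int × Int :=
  if st.2.2 > 0 && st.2.1 == some x then
    (st.1, st.2.1, st.2.2 + 1)
  else
    ((if st.2.2 > 0 then
        match st.2.1 with
        | some c => st.1.insert c st.2.2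
        | none => st.1          -- unreachable: run > 0 only after current was set
      else st.1),
     some x, 1)

-- trailing 'if run > 0: counts[current] = run'
def occurRunClose (st : PySem.Dict Int Int × Option Int × Int) : PySem.Dict Int Int :=
  if st.2.2 > 0 then
    match st.2.1 with
    | some c => st.1.insert c st.2.2
    | none => st.1              -- unreachable, as above
  else st.1

-- return {x: counts[x] for x in dict.fromkeys(list)}   (counts[x] always present: x ∈ list)
def occur_numbers_alt (list : List Int) : List (Int × Int) :=
  let counts :=
    occurRunClose
      ((PySem.List.sorted list (fun x => x) false).foldl occurRunStep
        (PySem.Dict.empty, none, 0))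
  ((PySem.List.dedup list).foldl
      (fun d x => d.insert x ((counts.get? x).getD 0))
      (PySem.Dict.empty : PySem.Dict Int Int)).items

-- ===== PRECONDITION & SPEC =====
def Spec_occur_numbers (list : List Int) (out : List (Int × Int)) : Prop := out = occur_numbers_alt list
instance (list : List Int) (out : List (Int × Int)) : Decidable (Spec_occur_numbers list out) := by unfold Spec_occur_numbers; infer_instance

-- ===== CLAIM (what is proved, stated in full; the proofs are below) =====
def Claim_equal_occur_numbers : Prop := ∀ (list : List Int), Dom_occur_numbers list → Spec_occur_numbers list (occur_numbers list)

-- ===== LEMMAS AND PROOFS =====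
-- A's loop body is exactly Counter's update step: modify on a missing key inserts f(default).
theorem occur_step_eq_modify :
    (fun (d : PySem.Dict Int Int) (number : Int) =>
      if d.contains number then d.modify number 0 (· + 1) else d.insert number 1)
    = fun d number => d.modify number 0 (· + 1) := by
  funext d x
  by_cases h : d.contains x
  · simp [h, PySem.Dict.modify]
  · simp only [h]
    rw [PySem.Dict.modify, PySem.Dict.getD_of_not_contains _ _ (by simpa using h)]
    simp

-- run-length invariant: mid-run over a sorted remainder, every value's final count is right
theorem occurRun_inv (t : List Int) : ∀ (counts : PySem.Dict Int Int) (c run : Int),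
    0 < run → (∀ x ∈ t, c ≤ x) → t.Pairwise (· ≤ ·) →
    ∀ v, (occurRunClose (t.foldl occurRunStep (counts, some c, run))).getD v 0 =
      if v = c then run + t.count c
      else if v ∈ t then (t.count v : Int)
      else counts.getD v 0 := by
  induction t with
  | nil =>
    intro counts c run hrun _ _ v
    simp [occurRunClose, hrun, PySem.Dict.getD_insert]
  | cons x t' ih =>
    intro counts c run hrun hle hpw v
    by_cases hxc : x = c
    · subst hxc
      rw [List.foldl_cons, show occurRunStep (counts, some x, run) x = (counts, some x, run + 1) by
        simp [occurRunStep, hrun]]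
      rw [ih counts x (run + 1) (by omega) (fun y hy => hle y (List.mem_cons_of_mem _ hy))
        (List.Pairwise.of_cons hpw) v]
      by_cases hvx : v = x
      · subst hvx; simp; ring
      · by_cases hvt : v ∈ t' <;>
          simp [hvx, hvt, show ¬x = v from fun h => hvx h.symm]
    · have hcx : c < x := lt_of_le_of_ne (hle x (List.mem_cons_self)) (Ne.symm hxc)
      rw [List.foldl_cons, show occurRunStep (counts, some c, run) x
          = (counts.insert c run, some x, 1) by
        simp [occurRunStep, hrun, show ¬c = x from fun h => hxc h.symm]]
      rw [ih (counts.insert c run) x 1 one_pos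
        (fun y hy => (List.pairwise_cons.mp hpw).1 y hy)
        (List.Pairwise.of_cons hpw) v]
      have hct' : c ∉ t' := fun h => absurd ((List.pairwise_cons.mp hpw).1 c h) (not_le.mpr hcx)
      by_cases hvx : v = x
      · simp [hvx, show ¬x = c from hxc]
        omega
      · by_cases hvc : v = c
        · subst hvc
          have hvnx : v ∉ (x :: t') := by simp [hvx, hct']
          simp [hct', hvx, List.count_eq_zero_of_not_mem hvnx]
        · by_cases hvt : v ∈ t' <;>
            simp [hvx, hvc, hvt, List.mem_cons, PySem.Dict.getD_insert,
              show ¬x = v from fun h => hvx h.symm]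

-- the whole B counting phase computes list.count, for every value
theorem occurRun_counts (list : List Int) (v : Int) :
    (occurRunClose
      ((PySem.List.sorted list (fun x => x) false).foldl occurRunStep
        (PySem.Dict.empty, none, 0))).getD v 0 = list.count v := by
  have hperm := PySem.List.sorted_perm list (fun x => x) false
  rw [← hperm.count_eq v]
  have hpw : (PySem.List.sorted list (fun x => x) false).Pairwise (· ≤ ·) := by
    simpa using PySem.List.sorted_pairwise list (fun x => x)
  cases hs : PySem.List.sorted list (fun x => x) false with
  | nil => simp [occurRunClose]
  | cons x t' =>
    rw [hs] at hpw
    rw [List.foldl_cons, show occurRunStep (PySem.Dict.empty, none, 0) x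
        = (PySem.Dict.empty, some x, 1) by simp [occurRunStep]]
    rw [occurRun_inv t' PySem.Dict.empty x 1 one_pos
      (fun y hy => (List.pairwise_cons.mp hpw).1 y hy) (List.Pairwise.of_cons hpw) v]
    by_cases hvx : v = x
    · subst hvx; simp; ring
    · by_cases hvt : v ∈ t'
      · simp [hvx, hvt, show ¬x = v from fun h => hvx h.symm]
      · simp [hvx, hvt, List.count_eq_zero_of_not_mem hvt,
          show ¬x = v from fun h => hvx h.symm]

-- ===== VERDICT (by name: the statement is the Claim_ definition above) =====
theorem occur_numbers_spec : Claim_equal_occur_numbers := by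
  intro list _
  show occur_numbers list = occur_numbers_alt list
  unfold occur_numbers occur_numbers_alt
  rw [occur_step_eq_modify, ← PySem.Dict.counter_eq_foldl, PySem.Dict.items_counter]
  rw [PySem.Dict.items_foldl_insert_fresh _ _ _ _
    (fun a _ => PySem.Dict.contains_empty a)
    (by simp)]
  simp only [show (PySem.Dict.empty : PySem.Dict Int Int).items = [] from rfl,
    List.nil_append, PySem.List.dedup_eq_ofList]
  apply List.map_congr_left
  intro x _
  rw [← PySem.Dict.getD_eq_get?_getD, occurRun_counts]
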